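-- pv_equiv track=rewrite | github.com/GimmickNG/CyberSWaT | simulator/modbus/compat/base_structs.py | ba2int
-- ===== SOURCE A (Python) =====
-- from typing import Callable, Iterable, List, Literal, Optional
--
-- class bitarray(list):
--     def __init__(self, size, endian: Literal['little', 'big'] = 'big'):
--         for _ in range(size):
--             self.append(False)
--     def setall(self, val: Literal[0, 1]) -> None:
--         for i in range(len(self)):
--             self[i] = val
--
-- def ba2int(value: bitarray, signed: bool = True) -> int:
--     negative = signed == True and value[0] == 1
--     if negative:
--         # negative number, convert to 2s complement later
--         ba = bitarray(len(value))
--         for i, val in enumerate(value):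
--             ba[i] = int(not val)
--         value = ba
--     x = 0
--     for bit in value:
--         x = (x << 1) | bit
--     if negative:
--         x = -(x + 1)
--     return x
-- ===== SOURCE B (Python) =====
-- def ba2int(value, signed: bool = True) -> int:
--     if signed == True and value[0] == 1:
--         # negative: sum the weights of the truthy bits, then apply the
--         # two's-complement closed form by subtracting 2**len(value)
--         n = len(value)
--         z = 0
--         for i, bit in enumerate(value):
--             if bit:
--                 z += 1 << (n - 1 - i)
--         return z - (1 << n)
--     x = 0
--     for bit in value:
--         x = (x << 1) | bit
--     return x
-- ===== Notes on version B (the rewrite author's own statement) =====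
-- stated objective: simpler
-- what changed: Drops the bit-inversion pass and the extra bitarray buffer: for negative numbers B sums the weights of the truthy bits in one enumerate pass and applies the two's-complement closed form (subtract 2 to the power of the bit length), instead of A's invert-build-then-negate.
import Mathlib
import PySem

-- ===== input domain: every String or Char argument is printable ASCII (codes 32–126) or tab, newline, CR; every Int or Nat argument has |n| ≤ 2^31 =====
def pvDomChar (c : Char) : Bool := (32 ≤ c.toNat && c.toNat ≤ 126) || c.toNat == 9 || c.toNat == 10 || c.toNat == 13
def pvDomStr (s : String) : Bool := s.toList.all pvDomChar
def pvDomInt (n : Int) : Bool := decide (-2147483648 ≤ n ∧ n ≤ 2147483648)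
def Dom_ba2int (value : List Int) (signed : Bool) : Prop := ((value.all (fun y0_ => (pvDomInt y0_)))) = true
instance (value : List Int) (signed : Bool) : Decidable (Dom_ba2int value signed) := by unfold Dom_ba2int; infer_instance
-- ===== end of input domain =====

-- B replaces A's invert-the-bits-then-negate pass for negative numbers by one
-- weighted sum of the truthy bits followed by the two's-complement closed form
-- z - 2^len(value); objective: simpler (same O(n) cost).

-- ===== PORT A =====
-- `x << 1` is `x <<< (1:Nat)`, `|` is PySem.Int.bor (exact on all ints);
-- the element loop writing `ba[i] = int(not val)` is the elementwise map below.
def ba2int (value : List Int) (signed : Bool) : Int :=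
  let negative := signed == true && PySem.List.pyGet? value 0 == some 1
  let value' := if negative then value.map (fun v => if v == 0 then (1:Int) else 0) else value
  let x := value'.foldl (fun x bit => PySem.Int.bor (x <<< (1:Nat)) bit) 0
  if negative then -(x + 1) else x

-- ===== PORT B =====
-- `1 << k` with k = n-1-i ≥ 0 (enumerate indices satisfy 0 ≤ i < n) is `(1:Int) <<< k`
-- with the Nat exponent n - 1 - i.toNat; `if bit:` is int truthiness, bit ≠ 0.
def ba2int_alt (value : List Int) (signed : Bool) : Int :=
  if signed == true && PySem.List.pyGet? value 0 == some 1 then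
    let n := value.length
    let z := (PySem.List.enumerate value).foldl
      (fun z p => if p.2 ≠ 0 then z + ((1:Int) <<< (n - 1 - p.1.toNat)) else z) 0
    z - ((1:Int) <<< n)
  else
    value.foldl (fun x bit => PySem.Int.bor (x <<< (1:Nat)) bit) 0

-- ===== PRECONDITION & SPEC =====
-- Pre_ excludes only the inputs where Python A raises: the
-- guard indexes the first element, an IndexError on the empty list when signed is true.
def Pre_ba2int (value : List Int) (signed : Bool) : Prop :=
  signed = true → value ≠ []
instance (value : List Int) (signed : Bool) : Decidable (Pre_ba2int value signed) := by
  unfold Pre_ba2int; infer_instance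
def pvWitness_ba2int : List Int × Bool := ([1, 0, 1], true)

def Spec_ba2int (value : List Int) (signed : Bool) (out : Int) : Prop := out = ba2int_alt value signed
instance (value : List Int) (signed : Bool) (out : Int) : Decidable (Spec_ba2int value signed out) := by unfold Spec_ba2int; infer_instance

-- ===== CLAIM =====
def Claim_equal_ba2int : Prop := ∀ (value : List Int) (signed : Bool),
  Dom_ba2int value signed → Pre_ba2int value signed → Spec_ba2int value signed (ba2int value signed)

-- ===== LEMMAS AND PROOFS =====

-- value of the complemented bits (what A's inverted buffer encodes)
def pvU : List Int → Int
  | [] => 0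
  | b :: t => (if b == 0 then 1 else 0) * 2 ^ t.length + pvU t

-- value of the truthy bits (what B's weighted sum encodes)
def pvZ : List Int → Int
  | [] => 0
  | b :: t => (if b ≠ 0 then 2 ^ t.length else 0) + pvZ t

theorem pv_or_step (x c : Int) (hx : 0 ≤ x) (hc : c = 0 ∨ c = 1) :
    PySem.Int.bor (x <<< (1:Nat)) c = 2 * x + c := by
  rw [Int.shiftLeft_eq]
  have h2 : x * 2 ^ 1 = 2 * x := by ring
  rw [h2]
  rcases hc with rfl | rfl
  · simp [PySem.Int.bor_zero]
  · rw [PySem.Int.bor_of_nonneg (by omega) (by norm_num)]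
    have ht : (2 * x).toNat = 2 * x.toNat := by omega
    have h1 : (1:Int).toNat = 1 := rfl
    rw [ht, h1]
    have hb := Nat.lor_bit false x.toNat true 0
    simp [Nat.bit] at hb
    rw [hb]; omega

theorem pv_foldA (l : List Int) (acc : Int) (hacc : 0 ≤ acc) :
    (l.map (fun v => if v == 0 then (1:Int) else 0)).foldl
      (fun x bit => PySem.Int.bor (x <<< (1:Nat)) bit) acc
      = acc * 2 ^ l.length + pvU l := by
  induction l generalizing acc with
  | nil => simp [pvU]
  | cons b t ih =>
    simp only [List.map_cons, List.foldl_cons, pvU, List.length_cons]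
    rw [pv_or_step acc _ hacc (by split <;> simp)]
    rw [ih _ (by split <;> omega)]
    rw [pow_succ]
    ring

theorem pv_foldB (l : List Int) (s : Nat) (n : Nat) (acc : Int)
    (hn : s + l.length = n) :
    (PySem.List.enumerate l (s : Int)).foldl
      (fun z p => if p.2 ≠ 0 then z + ((1:Int) <<< (n - 1 - p.1.toNat)) else z) acc
      = acc + pvZ l := by
  induction l generalizing s acc with
  | nil => simp [PySem.List.enumerate_nil, pvZ]
  | cons b t ih =>
    rw [PySem.List.enumerate_cons, List.foldl_cons]
    have hs : ((s : Int) + 1) = ((s + 1 : Nat) : Int) := by push_cast; ring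
    have hlen : s + 1 + t.length = n := by simp [List.length_cons] at hn; omega
    rw [hs, ih (s + 1) _ hlen]
    have hexp : n - 1 - ((s : Int)).toNat = t.length := by
      simp only [Int.toNat_natCast]; omega
    simp only [pvZ, hexp]
    rw [Int.shiftLeft_eq]
    split <;> ring

theorem pv_sum (l : List Int) : pvU l + pvZ l = 2 ^ l.length - 1 := by
  induction l with
  | nil => simp [pvU, pvZ]
  | cons b t ih =>
    have h : (if b == 0 then (1:Int) else 0) * 2 ^ t.length
           + (if b ≠ 0 then (2:Int) ^ t.length else 0) = 2 ^ t.length := by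
      by_cases hb : b = 0 <;> simp [hb]
    simp only [pvU, pvZ, List.length_cons, pow_succ]
    linarith [h, ih]

-- ===== VERDICT =====
theorem ba2int_spec : Claim_equal_ba2int := by
  intro value signed _ hpre
  unfold Spec_ba2int ba2int ba2int_alt
  by_cases hneg : (signed == true && PySem.List.pyGet? value 0 == some 1) = true
  · simp only [hneg, if_pos] at *
    have hA := pv_foldA value 0 (le_refl 0)
    rw [hA]
    have hB := pv_foldB value 0 value.length 0 (by omega)
    rw [show ((0:Nat) : Int) = 0 from rfl] at hB
    rw [hB]
    have hs := pv_sum value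
    rw [Int.shiftLeft_eq]
    omega
  · simp only [Bool.not_eq_true] at hneg
    simp only [hneg, Bool.false_eq_true, if_false]
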